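-- pv_equiv track=rewrite | github.com/PaddlePaddle/PaddleOCR | ppocr/metrics/spts_metric.py | include_in_dictionary_transcription
-- ===== SOURCE A (Python) =====
-- def include_in_dictionary_transcription(transcription):
--     #special case 's at final
--     if transcription[len(transcription)-2:]=="'s" or transcription[len(transcription)-2:]=="'S":
--         transcription = transcription[0:len(transcription)-2]
--     #hypens at init or final of the word
--     transcription = transcription.strip('-');
--     specialCharacters = str("'!?.:,*\"()·[]/")
--     for character in specialCharacters:
--         transcription = transcription.replace(character,' ')
--     transcription = transcription.strip()
--     return transcription
-- ===== SOURCE B (Python) =====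
-- SPECIAL = set("'!?.:,*\"()\u00b7[]/")
--
-- def include_in_dictionary_transcription(transcription):
--     # special case 's / 'S at final
--     if transcription.endswith(("'s", "'S")):
--         transcription = transcription[:-2]
--     # hyphens at init or final of the word
--     transcription = transcription.strip('-')
--     # one pass: map every special character to a space
--     transcription = ''.join(' ' if c in SPECIAL else c for c in transcription)
--     return transcription.strip()
-- ===== Notes on version B (the rewrite author's own statement) =====
-- stated objective: idiomatic
-- what changed: Replaces the 13 sequential full-string replace() scans with a single character-level pass mapping members of a precomputed special-character set to spaces, and the slice-equality suffix test with str.endswith.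
import Mathlib
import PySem

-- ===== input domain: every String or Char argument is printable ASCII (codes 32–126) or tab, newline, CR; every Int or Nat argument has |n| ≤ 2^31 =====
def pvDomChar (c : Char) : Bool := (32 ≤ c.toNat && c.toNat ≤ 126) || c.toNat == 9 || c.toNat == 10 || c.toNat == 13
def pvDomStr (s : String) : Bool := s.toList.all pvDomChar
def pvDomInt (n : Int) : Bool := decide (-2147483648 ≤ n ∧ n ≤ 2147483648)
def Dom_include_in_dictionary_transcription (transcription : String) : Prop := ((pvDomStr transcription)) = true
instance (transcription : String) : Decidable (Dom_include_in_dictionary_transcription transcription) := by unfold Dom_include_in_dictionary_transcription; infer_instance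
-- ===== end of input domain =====

-- B replaces A's 13 sequential full-string replace() scans with one character-level
-- pass over a precomputed special-character set (objective: idiomatic single pass).


-- ===== PORT A =====
def include_in_dictionary_transcription (transcription : String) : String :=
  -- special case 's at final
  let t1 :=
    if PySem.Str.slice transcription (some (PySem.Str.len transcription - 2)) none == "'s" ||
       PySem.Str.slice transcription (some (PySem.Str.len transcription - 2)) none == "'S" then
      PySem.Str.slice transcription (some 0) (some (PySem.Str.len transcription - 2))
    else transcription
  -- hyphens at init or final of the word
  let t2 := PySem.Str.stripChars t1 "-"
  -- for character in specialCharacters: transcription = transcription.replace(character, ' ')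
  let t3 := ("'!?.:,*\"()·[]/" : String).toList.foldl
    (fun t a => PySem.Str.replace t (String.ofList [a]) " ") t2
  PySem.Str.strip t3

-- ===== PORT B =====
def pvSpecialSet : PySem.Set Char := PySem.Set.ofList ("'!?.:,*\"()·[]/" : String).toList

def include_in_dictionary_transcription_alt (transcription : String) : String :=
  let t1 :=
    if PySem.Str.endswith transcription "'s" || PySem.Str.endswith transcription "'S" then
      PySem.Str.slice transcription none (some (-2))
    else transcription
  let t2 := PySem.Str.stripChars t1 "-"
  let t3 := String.ofList (t2.toList.map (fun c => if pvSpecialSet.contains c then ' ' else c))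
  PySem.Str.strip t3

-- ===== PRECONDITION & SPEC =====
def Spec_include_in_dictionary_transcription (transcription : String) (out : String) : Prop := out = include_in_dictionary_transcription_alt transcription
instance (transcription : String) (out : String) : Decidable (Spec_include_in_dictionary_transcription transcription out) := by unfold Spec_include_in_dictionary_transcription; infer_instance

-- ===== CLAIM (what is proved, stated in full; the proofs are below) =====
def Claim_equal_include_in_dictionary_transcription : Prop := ∀ (transcription : String), Dom_include_in_dictionary_transcription transcription → Spec_include_in_dictionary_transcription transcription (include_in_dictionary_transcription transcription)

-- ===== LEMMAS AND PROOFS =====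

-- s[len(s)-2:] is drop (len - 2) (Nat clamping agrees with Python's negative-index clamping)
theorem pv_slice_last2 (l : List Char) :
    PySem.List.slice l (some ((l.length : Int) - 2)) none = l.drop (l.length - 2) := by
  simp only [PySem.List.slice, PySem.List.clampIdx]
  split_ifs with h1 h3
  · have h0 : l.length = 0 := by omega
    simp [List.take_of_length_le, h0, List.drop_of_length_le]
  · have h0 : l.length = 1 := by omega
    have ht : ((l.length : Int) + ((l.length : Int) - 2)).toNat = 0 := by omega
    rw [ht]
    simp [List.take_of_length_le, h0]
  · have ha : min ((l.length : Int) - 2).toNat l.length = l.length - 2 := by omega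
    rw [ha]
    exact List.take_of_length_le (by simp)

-- s[0:len(s)-2] is take (len - 2)
theorem pv_slice_take2 (l : List Char) :
    PySem.List.slice l (some 0) (some ((l.length : Int) - 2)) = l.take (l.length - 2) := by
  simp only [PySem.List.slice, PySem.List.clampIdx]
  split_ifs
  all_goals try simp only [Int.toNat_zero, Nat.zero_min, List.drop_zero, Nat.sub_zero]
  all_goals first | omega | (congr 1; omega)

-- s[:-2] is take (len - 2) as well
theorem pv_slice_neg2 (l : List Char) :
    PySem.List.slice l none (some (-2)) = l.take (l.length - 2) := by
  simp only [PySem.List.slice, PySem.List.clampIdx]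
  split_ifs
  all_goals try simp only [List.drop_zero, Nat.sub_zero]
  all_goals first | omega | (congr 1; omega)

-- comparing the last-two-characters slice with a 2-character string is a suffix test
theorem pv_cond_eq (s t : String) (ht : t.toList.length = 2) :
    (PySem.Str.slice s (some (PySem.Str.len s - 2)) none == t) = PySem.Str.endswith s t := by
  have hlen : PySem.Str.len s = (s.toList.length : Int) := by
    simp [PySem.Str.len]
  have h1 : (PySem.Str.slice s (some (PySem.Str.len s - 2)) none).toList
      = s.toList.drop (s.toList.length - 2) := by
    rw [PySem.Str.toList_slice, hlen, PySem.Chars.slice_eq_listSlice, pv_slice_last2]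
  rw [Bool.eq_iff_iff, beq_iff_eq, PySem.Str.endswith_eq, PySem.Chars.endswith_iff,
    ← String.toList_inj, h1, List.suffix_iff_eq_drop, ht]
  constructor <;> (intro h; exact h.symm)

-- Python's replace.go with a single-character pattern maps that character pointwise
theorem pv_go_single (a b : Char) : ∀ (fuel : Nat) (l acc : List Char), l.length ≤ fuel →
    PySem.Chars.replace.go [a] [b] fuel l acc
      = acc.reverse ++ l.map (fun c => if c == a then b else c) := by
  intro fuel
  induction fuel with
  | zero =>
    intro l acc h
    cases l with
    | nil => simp [PySem.Chars.replace.go]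
    | cons c t => simp at h
  | succ n ih =>
    intro l acc h
    cases l with
    | nil => simp [PySem.Chars.replace.go]
    | cons c t =>
      simp only [PySem.Chars.replace.go]
      by_cases hc : a = c
      · have hpre : List.isPrefixOf [a] (c :: t) = true := by
          subst hc; simp [List.isPrefixOf]
        rw [if_pos hpre]
        rw [ih _ _ (by simp at h ⊢; omega)]
        subst hc; simp
      · have hpre : List.isPrefixOf [a] (c :: t) = false := by
          simp [List.isPrefixOf]
          exact fun h' => (hc h').elim
        rw [if_neg (by simp [hpre])]
        rw [ih _ _ (by simp at h ⊢; omega)]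
        have hcne : (c == a) = false := by simp; exact fun h' => hc h'.symm
        simp only [List.map_cons, hcne, Bool.false_eq_true, if_false, List.cons_append,
          List.reverse_cons, List.append_assoc, List.nil_append]

theorem pv_replace_single (a b : Char) (l : List Char) :
    PySem.Chars.replace l [a] [b] = l.map (fun c => if c == a then b else c) := by
  rw [PySem.Chars.replace]
  rw [if_neg (by simp)]
  simpa using pv_go_single a b l.length l [] (le_refl _)

-- A's replace loop over characters not containing ' ' is B's single membership map
theorem pv_foldl_replace (chars : List Char) (h : chars.contains ' ' = false) : ∀ (l : List Char),
    chars.foldl (fun t a => PySem.Chars.replace t [a] [' ']) l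
      = l.map (fun c => if chars.contains c then ' ' else c) := by
  induction chars with
  | nil => intro l; simp
  | cons a rest ih =>
    intro l
    simp only [List.contains_cons, Bool.or_eq_false_iff, beq_eq_false_iff_ne] at h
    obtain ⟨ha, hrest'⟩ := h
    simp only [List.foldl_cons]
    rw [pv_replace_single, ih hrest', List.map_map]
    apply List.map_congr_left
    intro c _
    by_cases hc : c = a
    · subst hc
      simp [Function.comp]
    · simp only [Function.comp, beq_iff_eq, if_neg hc, List.contains_cons]
      have : (c == a) = false := by simpa using hc
      simp [this]

-- the String-level replace loop computed on toList
theorem pv_foldl_replace_str (chars : List Char) (s : String) :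
    (chars.foldl (fun t a => PySem.Str.replace t (String.ofList [a]) " ") s).toList
      = chars.foldl (fun t a => PySem.Chars.replace t [a] [' ']) s.toList := by
  induction chars generalizing s with
  | nil => simp
  | cons a rest ih =>
    simp only [List.foldl_cons]
    rw [ih]
    congr 1
    rw [PySem.Str.toList_replace]
    congr 1
    all_goals simp

-- B's condition and slice produce A's trimmed string
theorem pv_t1_eq (s : String) :
    (if PySem.Str.slice s (some (PySem.Str.len s - 2)) none == "'s" ||
        PySem.Str.slice s (some (PySem.Str.len s - 2)) none == "'S" then
       PySem.Str.slice s (some 0) (some (PySem.Str.len s - 2))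
     else s)
    = (if PySem.Str.endswith s "'s" || PySem.Str.endswith s "'S" then
         PySem.Str.slice s none (some (-2))
       else s) := by
  have hlen : PySem.Str.len s = (s.toList.length : Int) := by simp [PySem.Str.len]
  have htrim : PySem.Str.slice s (some 0) (some (PySem.Str.len s - 2))
      = PySem.Str.slice s none (some (-2)) := by
    rw [← String.toList_inj, PySem.Str.toList_slice, PySem.Str.toList_slice, hlen,
      PySem.Chars.slice_eq_listSlice, PySem.Chars.slice_eq_listSlice,
      pv_slice_take2, pv_slice_neg2]
  rw [pv_cond_eq s "'s" (by decide), pv_cond_eq s "'S" (by decide), htrim]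

-- A's replace loop on any string is B's single membership map
theorem pv_t3_eq (u : String) :
    ("'!?.:,*\"()\u00b7[]/" : String).toList.foldl
      (fun t a => PySem.Str.replace t (String.ofList [a]) " ") u
    = String.ofList (u.toList.map (fun c => if pvSpecialSet.contains c then ' ' else c)) := by
  rw [← String.toList_inj, pv_foldl_replace_str, pv_foldl_replace _ (by decide)]
  simp only [String.toList_ofList]
  apply List.map_congr_left
  intro c _
  have hset : pvSpecialSet = ("'!?.:,*\"()\u00b7[]/" : String).toList := by decide
  rw [PySem.Set.contains, hset]

-- ===== VERDICT (by name: the statement is the Claim_ definition above) =====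
set_option maxRecDepth 4000 in
theorem include_in_dictionary_transcription_spec : Claim_equal_include_in_dictionary_transcription := by
  unfold Claim_equal_include_in_dictionary_transcription
  intro s _
  unfold Spec_include_in_dictionary_transcription
  show PySem.Str.strip
      (("'!?.:,*\"()\u00b7[]/" : String).toList.foldl
        (fun t a => PySem.Str.replace t (String.ofList [a]) " ")
        (PySem.Str.stripChars
          (if PySem.Str.slice s (some (PySem.Str.len s - 2)) none == "'s" ||
              PySem.Str.slice s (some (PySem.Str.len s - 2)) none == "'S" then
             PySem.Str.slice s (some 0) (some (PySem.Str.len s - 2))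
           else s) "-"))
    = PySem.Str.strip
        (String.ofList
          ((PySem.Str.stripChars
            (if PySem.Str.endswith s "'s" || PySem.Str.endswith s "'S" then
               PySem.Str.slice s none (some (-2))
             else s) "-").toList.map
            (fun c => if pvSpecialSet.contains c then ' ' else c)))
  rw [pv_t1_eq, pv_t3_eq]
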